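-- pv_equiv track=rewrite | github.com/Igorok/algorithms-js | leetcode/easy/2206_divideArray.py | divideArray
-- ===== SOURCE A (Python) =====
-- from typing import List
-- from collections import deque, defaultdict
--
-- def divideArray(nums: List[int]) -> bool:
--     numsSum = defaultdict(int)
--
--     for num in nums:
--         numsSum[num] += 1
--
--     for s in numsSum.values():
--         if s % 2 == 1:
--             return False
--
--     return True
-- ===== SOURCE B (Python) =====
-- from typing import List
--
-- def divideArray(nums: List[int]) -> bool:
--     odd = set()
--     for num in nums:
--         if num in odd:
--             odd.discard(num)
--         else:
--             odd.add(num)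
--     return not odd
-- ===== Notes on version B (the rewrite author's own statement) =====
-- stated objective: idiomatic
-- what changed: Replaces the count-dict build plus a second parity-scan over its values with a single toggling pass maintaining the set of values seen an odd number of times and one emptiness test.
import Mathlib
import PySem

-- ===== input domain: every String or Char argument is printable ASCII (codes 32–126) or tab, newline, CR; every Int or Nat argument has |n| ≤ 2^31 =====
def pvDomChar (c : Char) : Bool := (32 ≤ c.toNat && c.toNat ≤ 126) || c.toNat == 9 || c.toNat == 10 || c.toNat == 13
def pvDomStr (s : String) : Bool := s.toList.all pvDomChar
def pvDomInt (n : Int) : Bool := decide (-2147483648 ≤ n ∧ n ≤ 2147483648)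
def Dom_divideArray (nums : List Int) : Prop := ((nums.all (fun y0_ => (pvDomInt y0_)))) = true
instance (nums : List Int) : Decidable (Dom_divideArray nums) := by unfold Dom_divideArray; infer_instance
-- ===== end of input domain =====

-- B replaces A's count-dict plus second parity-scan loop with one toggling pass over a set
-- of odd-count values and a single emptiness test (idiomatic; same return value everywhere).

-- ===== PORT A =====
-- numsSum = defaultdict(int); for num in nums: numsSum[num] += 1;
-- for s in numsSum.values(): if s % 2 == 1: return False;  return True
def divideArray (nums : List Int) : Bool :=
  let numsSum : PySem.Dict Int Int :=
    nums.foldl (fun d num => d.modify num 0 (· + 1)) PySem.Dict.empty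
  numsSum.values.all (fun s => !(PySem.Int.mod s 2 == 1))

-- ===== PORT B =====
-- odd = set(); for num in nums: if num in odd: odd.discard(num) else: odd.add(num);
-- return not odd
def divideArray_alt (nums : List Int) : Bool :=
  let odd : PySem.Set Int :=
    nums.foldl (fun s num =>
      if PySem.Set.contains s num then PySem.Set.discard s num
      else PySem.Set.add s num) PySem.Set.empty
  PySem.Set.len odd == 0

-- ===== PRECONDITION & SPEC =====
def Spec_divideArray (nums : List Int) (out : Bool) : Prop := out = divideArray_alt nums
instance (nums : List Int) (out : Bool) : Decidable (Spec_divideArray nums out) := by unfold Spec_divideArray; infer_instance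

-- ===== CLAIM (what is proved, stated in full; the proofs are below) =====
def Claim_equal_divideArray : Prop := ∀ (nums : List Int), Dom_divideArray nums → Spec_divideArray nums (divideArray nums)

-- ===== LEMMAS AND PROOFS =====

-- A's result is "every value's multiplicity in nums is even".
lemma divideArray_iff (nums : List Int) :
    divideArray nums = true ↔ ∀ x ∈ nums, nums.count x % 2 = 0 := by
  show ((nums.foldl (fun d num => d.modify num 0 (· + 1))
      PySem.Dict.empty).values.all (fun s => !(PySem.Int.mod s 2 == 1))) = true ↔ _
  rw [← PySem.Dict.counter_eq_foldl]
  rw [PySem.Dict.values_eq_map_keys _ (PySem.Dict.nodup_keys_counter nums) 0]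
  simp only [List.all_map, List.all_eq_true, Function.comp,
    PySem.Dict.getD_counter, PySem.Dict.keys_counter,
    Bool.not_eq_eq_eq_not, Bool.not_true, beq_eq_false_iff_ne,
    PySem.Set.mem_ofList]
  constructor
  · intro h x hx
    have := h x hx
    have hm : PySem.Int.mod (nums.count x : Int) 2 = ((nums.count x % 2 : Nat) : Int) :=
      PySem.Int.mod_natCast _ _
    omega
  · intro h x hx
    have := h x hx
    have hm : PySem.Int.mod (nums.count x : Int) 2 = ((nums.count x % 2 : Nat) : Int) :=
      PySem.Int.mod_natCast _ _
    omega

-- The toggling loop's invariant: membership in the state is parity of the count so far.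
lemma toggle_mem (l : List Int) : ∀ (s : PySem.Set Int), s.Nodup → ∀ x,
    (x ∈ l.foldl (fun s num =>
      if PySem.Set.contains s num then PySem.Set.discard s num
      else PySem.Set.add s num) s ↔ ((x ∈ s) ↔ l.count x % 2 = 0)) := by
  induction l with
  | nil => intro s hs x; simp
  | cons a t ih =>
    intro s hs x
    simp only [List.foldl_cons]
    by_cases ha : a ∈ s
    · have hc : PySem.Set.contains s a = true := (PySem.Set.contains_iff s a).mpr ha
      have hif : (if PySem.Set.contains s a = true then PySem.Set.discard s a
          else PySem.Set.add s a) = PySem.Set.discard s a := by simp [ha]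
      rw [hif, ih _ (PySem.Set.nodup_discard _ _ hs) x, PySem.Set.mem_discard]
      by_cases hxa : x = a
      · subst hxa
        have hcnt : (x :: t).count x = t.count x + 1 := by simp
        rw [hcnt]
        have hpar : (t.count x + 1) % 2 = 0 ↔ ¬(t.count x % 2 = 0) := by omega
        rw [hpar]
        tauto
      · have hcnt : (a :: t).count x = t.count x := by simp [Ne.symm hxa]
        rw [hcnt]
        tauto
    · have hc : PySem.Set.contains s a = false := by
        rcases h : PySem.Set.contains s a with _ | _
        · rfl
        · exact absurd ((PySem.Set.contains_iff s a).mp h) ha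
      have hif : (if PySem.Set.contains s a = true then PySem.Set.discard s a
          else PySem.Set.add s a) = PySem.Set.add s a := by simp [ha]
      rw [hif, ih _ (PySem.Set.nodup_add _ _ hs) x, PySem.Set.mem_add]
      by_cases hxa : x = a
      · subst hxa
        have hcnt : (x :: t).count x = t.count x + 1 := by simp
        rw [hcnt]
        have hpar : (t.count x + 1) % 2 = 0 ↔ ¬(t.count x % 2 = 0) := by omega
        rw [hpar]
        tauto
      · have hcnt : (a :: t).count x = t.count x := by simp [Ne.symm hxa]
        rw [hcnt]
        tauto

-- B's result is also "every value's multiplicity in nums is even".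
lemma divideArray_alt_iff (nums : List Int) :
    divideArray_alt nums = true ↔ ∀ x ∈ nums, nums.count x % 2 = 0 := by
  show (PySem.Set.len (nums.foldl (fun s num =>
      if PySem.Set.contains s num then PySem.Set.discard s num
      else PySem.Set.add s num) PySem.Set.empty) == 0) = true ↔ _
  rw [beq_iff_eq]
  simp only [PySem.Set.len, Int.natCast_eq_zero, List.length_eq_zero_iff,
    List.eq_nil_iff_forall_not_mem]
  have hmem := toggle_mem nums PySem.Set.empty (by simp [PySem.Set.empty]) 
  constructor
  · intro h x hx
    have := h x
    rw [hmem x] at this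
    simp only [PySem.Set.empty, List.not_mem_nil, false_iff] at this
    omega
  · intro h x
    rw [hmem x]
    simp only [PySem.Set.empty, List.not_mem_nil, false_iff]
    intro hc
    by_cases hx : x ∈ nums
    · exact absurd hc (by simpa using h x hx)
    · exact absurd hc (by simp [List.count_eq_zero_of_not_mem hx])

-- ===== VERDICT (by name: the statement is the Claim_ definition above) =====
theorem divideArray_spec : Claim_equal_divideArray := by
  intro nums _
  unfold Spec_divideArray
  rcases hb : divideArray_alt nums with _ | _
  · rcases ha : divideArray nums with _ | _
    · rfl
    · exact absurd ((divideArray_alt_iff nums).mpr ((divideArray_iff nums).mp ha)) (by simp [hb])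
  · exact (divideArray_iff nums).mpr ((divideArray_alt_iff nums).mp hb)
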